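-- pv_equiv track=rewrite | github.com/IDEMSInternational/openintro-statistics | scripts/convert_solutions_latex_to_pretext.py | extract_braced_content
-- ===== SOURCE A (Python) =====
-- def extract_braced_content(text, start_pos):
--     """Extract content within braces, handling nested braces"""
--     if start_pos >= len(text) or text[start_pos] != '{':
--         return None, start_pos
--
--     depth = 0
--     i = start_pos
--     result = []
--
--     while i < len(text):
--         char = text[i]
--         if char == '{':
--             depth += 1
--             if depth > 1:  # Don't include the outer braces
--                 result.append(char)
--         elif char == '}':
--             depth -= 1
--             if depth == 0:
--                 return ''.join(result), i + 1
--             result.append(char)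
--         else:
--             if depth > 0:
--                 result.append(char)
--         i += 1
--
--     return ''.join(result), i
-- ===== SOURCE B (Python) =====
-- def _match_len(s, depth):
--     """Length of the prefix of s before the '}' that closes `depth` levels, or None."""
--     count = 0
--     for c in s:
--         if c == '}':
--             depth -= 1
--             if depth == 0:
--                 return count
--         elif c == '{':
--             depth += 1
--         count += 1
--     return None
--
-- def extract_braced_content(text, start_pos):
--     """Extract content within braces: measure the body length on the tail, then slice once."""
--     n = len(text)
--     if not (0 <= start_pos < n) or text[start_pos] != '{':
--         return None, start_pos
--     body = text[start_pos + 1:]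
--     k = _match_len(body, 1)
--     if k is None:
--         return body, n
--     return body[:k], start_pos + 1 + k + 1
-- ===== Notes on version B (the rewrite author's own statement) =====
-- stated objective: alternative
-- what changed: B replaces A's single scan-and-rebuild loop (conditional appends into a result list) by a two-stage decomposition: a helper measures the body length on the tail text[start_pos+1:] with a depth counter, and the result is produced by one slice of that tail; B also rejects negative start positions up front (see D_).
-- intended difference: On negative start_pos (with -len(text) <= start_pos < 0) whose wrapped character is '{', A scans from the Python-wrapped position and returns an extracted string, sometimes even with a negative end index; B returns (None, start_pos), the intended rejection of an invalid scan position. — e.g. on extract_braced_content("{a}", -3): A returns (some "a", 0), B returns (none, -3)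
import Mathlib
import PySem

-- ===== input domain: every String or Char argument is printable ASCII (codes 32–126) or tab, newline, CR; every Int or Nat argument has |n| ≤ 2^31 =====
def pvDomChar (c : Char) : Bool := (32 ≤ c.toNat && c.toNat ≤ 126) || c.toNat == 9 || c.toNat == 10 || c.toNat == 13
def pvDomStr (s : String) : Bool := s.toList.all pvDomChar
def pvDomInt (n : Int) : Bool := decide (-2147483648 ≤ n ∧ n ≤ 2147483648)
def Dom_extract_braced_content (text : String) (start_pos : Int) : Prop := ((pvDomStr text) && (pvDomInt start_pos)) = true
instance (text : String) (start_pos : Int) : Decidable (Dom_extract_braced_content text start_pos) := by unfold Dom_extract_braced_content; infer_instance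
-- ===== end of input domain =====

-- B decomposes the task into a body-length measurement on the tail plus one slice, instead of A's
-- rebuild-while-scanning loop (objective: alternative); B rejects negative start_pos (see D_).

-- ===== PORT A =====
-- while-loop of A: fuel = number of remaining iterations (len(text) - i); each step reads text[i].
-- Inside the loop i ≥ start_pos ≥ -len (Pre_), so pyGet? is some; .getD '?' is never taken on admitted inputs.
def ebcLoopA (chars : List Char) (fuel : Nat) (i : Int) (depth : Int) (result : List Char) :
    Option String × Int :=
  match fuel with
  | 0 => (some (String.mk result), i)                      -- while exit: return ''.join(result), i
  | f + 1 =>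
    let char := (PySem.Chars.pyGet? chars i).getD '?'
    if char = '{' then
      let depth' := depth + 1
      ebcLoopA chars f (i + 1) depth' (if depth' > 1 then result ++ [char] else result)
    else if char = '}' then
      let depth' := depth - 1
      if depth' = 0 then (some (String.mk result), i + 1)
      else ebcLoopA chars f (i + 1) depth' (result ++ [char])
    else
      ebcLoopA chars f (i + 1) depth (if depth > 0 then result ++ [char] else result)

-- guard: start_pos >= len(text) or text[start_pos] != '{' (Python wraps negative indices;
-- text[start_pos] raises IndexError for start_pos < -len — excluded by Pre_; the getD default is unreachable there).
def extract_braced_content (text : String) (start_pos : Int) : Option String × Int :=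
  let chars := text.toList
  let n : Int := (chars.length : Int)
  if start_pos ≥ n ∨ (PySem.Chars.pyGet? chars start_pos).getD '?' ≠ '{' then (none, start_pos)
  else ebcLoopA chars (n - start_pos).toNat start_pos 0 []

-- ===== PORT B =====
-- _match_len: fold over the tail, carrying only (depth, count); returns the body length or none.
def matchLen (s : List Char) (depth : Int) (count : Nat) : Option Nat :=
  match s with
  | [] => none
  | c :: rest =>
    if c = '}' then
      let depth' := depth - 1
      if depth' = 0 then some count else matchLen rest depth' (count + 1)
    else if c = '{' then matchLen rest (depth + 1) (count + 1)
    else matchLen rest depth (count + 1)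

def extract_braced_content_alt (text : String) (start_pos : Int) : Option String × Int :=
  let chars := text.toList
  let n : Int := (chars.length : Int)
  if ¬(0 ≤ start_pos ∧ start_pos < n) then (none, start_pos)
  else if (PySem.Chars.pyGet? chars start_pos).getD '?' ≠ '{' then (none, start_pos)
  else
    let body := PySem.List.slice chars (some (start_pos + 1)) none   -- text[start_pos+1:]
    match matchLen body 1 0 with
    | none => (some (String.mk body), n)
    | some k => (some (String.mk (PySem.List.slice body none (some (k : Int)))),  -- body[:k]
                 start_pos + 1 + (k : Int) + 1)

-- ===== PRECONDITION & SPEC =====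
-- Pre_ excludes start_pos < -len(text), where A raises IndexError on text[start_pos].
def Pre_extract_braced_content (text : String) (start_pos : Int) : Prop :=
  -(PySem.Str.len text) ≤ start_pos
instance (text : String) (start_pos : Int) : Decidable (Pre_extract_braced_content text start_pos) := by
  unfold Pre_extract_braced_content; infer_instance

def pvWitness_extract_braced_content : String × Int := ("{a{b}c}", 0)

-- On negative start_pos whose wrapped character is '{', A scans from the wrapped position and returns an
-- extracted string (even negative end indices); B returns (None, start_pos), the intended rejection of an
-- invalid position for this parser.
def D_extract_braced_content (text : String) (start_pos : Int) : Prop :=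
  -(PySem.Str.len text) ≤ start_pos ∧ start_pos < 0 ∧ PySem.Str.pyGet? text start_pos = some '{'
instance (text : String) (start_pos : Int) : Decidable (D_extract_braced_content text start_pos) := by
  unfold D_extract_braced_content; infer_instance

def Spec_extract_braced_content (text : String) (start_pos : Int) (out : Option String × Int) : Prop :=
  ¬ D_extract_braced_content text start_pos → out = extract_braced_content_alt text start_pos
instance (text : String) (start_pos : Int) (out : Option String × Int) :
    Decidable (Spec_extract_braced_content text start_pos out) := by
  unfold Spec_extract_braced_content; infer_instance

def pvDiffWitness_extract_braced_content : String × Int := ("{a}", -3)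
def pvDiffWitnessOut_extract_braced_content : (Option String × Int) × (Option String × Int) :=
  ((some "a", 0), (none, -3))

-- ===== CLAIM (what is proved, stated in full; the proofs are below) =====
def Claim_unchanged_extract_braced_content : Prop := ∀ (text : String) (start_pos : Int), Dom_extract_braced_content text start_pos → Pre_extract_braced_content text start_pos → Spec_extract_braced_content text start_pos (extract_braced_content text start_pos)
def Claim_changed_extract_braced_content : Prop := Dom_extract_braced_content (pvDiffWitness_extract_braced_content.1) (pvDiffWitness_extract_braced_content.2) ∧ Pre_extract_braced_content (pvDiffWitness_extract_braced_content.1) (pvDiffWitness_extract_braced_content.2) ∧ D_extract_braced_content (pvDiffWitness_extract_braced_content.1) (pvDiffWitness_extract_braced_content.2) ∧ extract_braced_content (pvDiffWitness_extract_braced_content.1) (pvDiffWitness_extract_braced_content.2) = pvDiffWitnessOut_extract_braced_content.1 ∧ extract_braced_content_alt (pvDiffWitness_extract_braced_content.1) (pvDiffWitness_extract_braced_content.2) = pvDiffWitnessOut_extract_braced_content.2 ∧ pvDiffWitnessOut_extract_braced_content.1 ≠ pvDiffWitnessOut_extract_braced_content.2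
def Claim_exact_extract_braced_content : Prop := ∀ (text : String) (start_pos : Int), Dom_extract_braced_content text start_pos → Pre_extract_braced_content text start_pos → D_extract_braced_content text start_pos → extract_braced_content text start_pos ≠ extract_braced_content_alt text start_pos

-- ===== LEMMAS AND PROOFS =====

theorem ebcLoopA_fst_isSome (chars : List Char) (fuel : Nat) :
    ∀ (i depth : Int) (result : List Char), (ebcLoopA chars fuel i depth result).1.isSome := by
  induction fuel with
  | zero => intro i depth result; simp [ebcLoopA]
  | succ f ih =>
    intro i depth result
    simp only [ebcLoopA]
    split_ifs <;> first | exact ih _ _ _ | simp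

theorem ebc_take_snoc (chars : List Char) (s j : Nat) (hsj : s ≤ j) (hj : j < chars.length) :
    List.take (j + 1 - s) (List.drop s chars)
      = List.take (j - s) (List.drop s chars) ++ [chars[j]] := by
  have h1 : j + 1 - s = (j - s) + 1 := by omega
  rw [h1, List.take_succ, List.getElem?_drop]
  have h2 : s + (j - s) = j := by omega
  rw [h2]
  simp [hj]

-- main invariant: A's loop from position j with result = text[s+1:j] computes what B computes
-- from matchLen on the rest of the string with count = j - (s+1).
theorem ebcLoop_eq (chars : List Char) (s : Nat) :
    ∀ (fuel j : Nat) (depth : Int), 1 ≤ depth → s + 1 ≤ j → j + fuel = chars.length →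
      ebcLoopA chars fuel (j : Int) depth (List.take (j - (s + 1)) (List.drop (s + 1) chars))
        = match matchLen (List.drop j chars) depth (j - (s + 1)) with
          | none => (some (String.mk (List.drop (s + 1) chars)), (chars.length : Int))
          | some k => (some (String.mk (List.take k (List.drop (s + 1) chars))),
                       (s : Int) + 1 + (k : Int) + 1) := by
  intro fuel
  induction fuel with
  | zero =>
    intro j depth _ hsj hlen
    have hj : j = chars.length := by omega
    subst hj
    simp [ebcLoopA, matchLen, List.take_of_length_le]
  | succ f ih =>
    intro j depth hd hsj hlen
    have hj : j < chars.length := by omega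
    have hget : PySem.Chars.pyGet? chars (j : Int) = some chars[j] := by
      simpa using (PySem.List.pyGet?_natCast (xs := chars) (n := j) hj)
    have hdrop : List.drop j chars = chars[j] :: List.drop (j + 1) chars :=
      List.drop_eq_getElem_cons hj
    have hsnoc := ebc_take_snoc chars (s + 1) j (by omega) hj
    have hcast : ((j : Int) + 1) = ((j + 1 : Nat) : Int) := by push_cast; ring
    simp only [ebcLoopA, hget, Option.getD_some, hdrop, matchLen]
    by_cases h1 : chars[j] = '}'
    · have h1' : ¬ chars[j] = '{' := by rw [h1]; decide
      simp only [h1', if_neg, if_pos h1, if_true, if_false]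
      by_cases h3 : depth - 1 = 0
      · rw [if_pos h3, if_pos h3]
        have : (s : Int) + 1 + ((j - (s + 1) : Nat) : Int) + 1 = (j : Int) + 1 := by
          push_cast [Nat.cast_sub (by omega : s + 1 ≤ j)]; ring
        simp [this]
      · rw [if_neg h3, if_neg h3, ← hsnoc, hcast,
          show (j - (s + 1)) + 1 = (j + 1) - (s + 1) from by omega]
        exact ih (j + 1) (depth - 1) (by omega) (by omega) (by omega)
    · simp only [if_neg h1]
      by_cases h2 : chars[j] = '{'
      · simp only [h2, reduceIte]
        rw [if_pos (by omega : depth + 1 > 1), ← h2, ← hsnoc, hcast,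
          show (j - (s + 1)) + 1 = (j + 1) - (s + 1) from by omega]
        exact ih (j + 1) (depth + 1) (by omega) (by omega) (by omega)
      · simp only [if_neg h2]
        rw [if_pos (by omega : depth > 0), ← hsnoc, hcast,
          show (j - (s + 1)) + 1 = (j + 1) - (s + 1) from by omega]
        exact ih (j + 1) depth hd (by omega) (by omega)

-- ===== VERDICT (by name: the statement is the Claim_ definition above) =====
theorem extract_braced_content_spec : Claim_unchanged_extract_braced_content := by
  intro text start_pos _dom hpre
  unfold Spec_extract_braced_content
  intro hnd
  have hpre' : -(text.toList.length : Int) ≤ start_pos := by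
    simpa [Pre_extract_braced_content, PySem.Str.len_eq] using hpre
  simp only [extract_braced_content, extract_braced_content_alt]
  by_cases hge : start_pos ≥ (text.toList.length : Int)
  · rw [if_pos (Or.inl hge), if_pos (by omega)]
  · push_neg at hge
    by_cases hneg : start_pos < 0
    · have hne : (PySem.Chars.pyGet? text.toList start_pos).getD '?' ≠ '{' := by
        cases h : PySem.Chars.pyGet? text.toList start_pos with
        | none => simp
        | some c =>
          simp only [Option.getD_some]
          intro hc
          subst hc
          exact hnd ⟨by simpa [Pre_extract_braced_content, PySem.Str.len_eq] using hpre, hneg,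
            by simpa using h⟩
      rw [if_pos (Or.inr hne), if_pos (by omega)]
    · push_neg at hneg
      obtain ⟨s, rfl⟩ : ∃ s : Nat, start_pos = (s : Int) := ⟨start_pos.toNat, by omega⟩
      have hs : s < text.toList.length := by exact_mod_cast hge
      have hget : PySem.Chars.pyGet? text.toList (s : Int) = some text.toList[s] := by
        simpa using (PySem.List.pyGet?_natCast (xs := text.toList) (n := s) hs)
      by_cases hbrace : text.toList[s] = '{'
      · have hcondA : ¬((s : Int) ≥ (text.toList.length : Int) ∨
            (PySem.Chars.pyGet? text.toList (s : Int)).getD '?' ≠ '{') := by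
          rw [hget]
          rintro (h | h)
          · omega
          · exact h (by simp [hbrace])
        rw [if_neg hcondA,
          if_neg (by omega : ¬¬(0 ≤ (s : Int) ∧ (s : Int) < (text.toList.length : Int))),
          if_neg (by rw [hget]; simp [hbrace])]
        -- A's first iteration consumes the '{' at s; then the invariant at j = s+1, depth 1.
        have hfuel : (((text.toList.length : Int)) - (s : Int)).toNat
            = (text.toList.length - s - 1) + 1 := by omega
        rw [hfuel]
        simp only [ebcLoopA, hget, Option.getD_some, hbrace, reduceIte]
        rw [if_neg (by omega : ¬((0 : Int) + 1 > 1))]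
        have hcast : ((s : Int) + 1) = ((s + 1 : Nat) : Int) := by push_cast; ring
        have hnil : ([] : List Char)
            = List.take ((s + 1) - (s + 1)) (List.drop (s + 1) text.toList) := by simp
        rw [hcast, hnil]
        have hinv := ebcLoop_eq text.toList s (text.toList.length - s - 1) (s + 1) (0 + 1)
          (by omega) (by omega) (by omega)
        rw [hinv, PySem.List.slice_from_natCast]
        simp only [show (s + 1) - (s + 1) = 0 from by omega,
          show (0 : Int) + 1 = 1 from by norm_num]
        cases hm : matchLen (List.drop (s + 1) text.toList) 1 0 with
        | none => simp
        | some k =>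
          simp only [PySem.List.slice_to_natCast, Prod.mk.injEq]
          exact ⟨trivial, by push_cast; ring⟩
      · have hne : (PySem.Chars.pyGet? text.toList (s : Int)).getD '?' ≠ '{' := by
          rw [hget]; simpa using hbrace
        rw [if_pos (Or.inr hne),
          if_neg (by omega : ¬¬(0 ≤ (s : Int) ∧ (s : Int) < (text.toList.length : Int))),
          if_pos hne]

theorem extract_braced_content_changed : Claim_changed_extract_braced_content := by
  unfold Claim_changed_extract_braced_content; decide

theorem extract_braced_content_tight : Claim_exact_extract_braced_content := by
  intro text start_pos _dom _hpre hd
  obtain ⟨h1, h2, h3⟩ := hd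
  have h1' : -(text.toList.length : Int) ≤ start_pos := by
    simpa [PySem.Str.len_eq] using h1
  have h3' : PySem.Chars.pyGet? text.toList start_pos = some '{' := by simpa using h3
  simp only [extract_braced_content, extract_braced_content_alt]
  rw [if_neg (by rw [h3']; simp; omega), if_pos (by omega)]
  intro heq
  have hsome := ebcLoopA_fst_isSome text.toList
    (((text.toList.length : Int)) - start_pos).toNat start_pos 0 []
  rw [heq] at hsome
  simp at hsome
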